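-- pv_equiv track=rewrite | github.com/Samarpeet/RadioFlow | agents/report_generator.py | _is_report_valid
-- ===== SOURCE A (Python) =====
-- def _is_report_valid(report_text: str) -> bool:
--     """Check if model-generated report is valid (not repetitive/broken)."""
--     if not report_text or len(report_text) < 50:
--         return False
--
--     # Check for excessive disclaimers (more than 2)
--     disclaimer_count = report_text.lower().count('disclaimer')
--     if disclaimer_count > 2:
--         return False
--
--     # Check for repetitive lines
--     lines = report_text.split('\n')
--     if len(lines) > 5:
--         line_counts = {}
--         for line in lines:
--             line_stripped = line.strip()
--             if len(line_stripped) > 20: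
--                 line_counts[line_stripped] = line_counts.get(line_stripped, 0) + 1
--                 if line_counts[line_stripped] > 2:
--                     return False
--
--     return True
-- ===== SOURCE B (Python) =====
-- def _is_report_valid(report_text: str) -> bool:
--     """Check if model-generated report is valid (not repetitive/broken)."""
--     if not report_text or len(report_text) < 50:
--         return False
--
--     if report_text.lower().count('disclaimer') > 2:
--         return False
--
--     lines = report_text.split('\n')
--     if len(lines) > 5:
--         # sort-then-scan duplicate detection: equal lines become adjacent
--         longs = sorted(s for s in (ln.strip() for ln in lines) if len(s) > 20)
--         if longs:
--             prev = longs[0]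
--             run = 1
--             for s in longs[1:]:
--                 if s == prev:
--                     run += 1
--                     if run > 2:
--                         return False
--                 else:
--                     prev = s
--                     run = 1
--
--     return True
-- ===== Notes on version B (the rewrite author's own statement) =====
-- stated objective: alternative
-- what changed: The repetitive-line check no longer counts occurrences incrementally in a dict with an early return; B sorts the stripped long lines and scans once for a run of 3 equal adjacent strings.
import Mathlib
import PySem

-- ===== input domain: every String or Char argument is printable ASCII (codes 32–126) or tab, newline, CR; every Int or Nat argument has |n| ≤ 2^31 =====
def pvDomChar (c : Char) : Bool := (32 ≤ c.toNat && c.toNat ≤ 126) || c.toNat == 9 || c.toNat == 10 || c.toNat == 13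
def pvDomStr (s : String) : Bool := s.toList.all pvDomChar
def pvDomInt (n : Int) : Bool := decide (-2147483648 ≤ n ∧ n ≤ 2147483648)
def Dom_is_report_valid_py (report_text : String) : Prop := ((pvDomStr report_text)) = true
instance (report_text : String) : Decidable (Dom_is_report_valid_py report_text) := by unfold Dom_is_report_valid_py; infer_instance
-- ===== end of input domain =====

-- B replaces A's incremental dict counting of repeated long lines by sort-then-scan
-- (sort the stripped long lines, walk once tracking the current run length); objective: alternative.

-- ===== PORT A =====
-- the 'for line in lines' loop with its dict counter and early return (sticky false)
def pvALoop : List String → PySem.Dict String Int → Bool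
  | [], _ => true
  | line :: rest, d =>
    let s := PySem.Str.strip line
    if PySem.Str.len s > 20 then
      let d' := d.insert s (d.getD s 0 + 1)
      if d'.getD s 0 > 2 then false else pvALoop rest d'
    else pvALoop rest d

def is_report_valid_py (report_text : String) : Bool :=
  if report_text == "" || PySem.Str.len report_text < 50 then false
  else if PySem.Str.count (PySem.Str.lower report_text) "disclaimer" > 2 then false
  else
    let lines := (PySem.Str.split? report_text "\n").getD []
    if lines.length > 5 then pvALoop lines PySem.Dict.empty
    else true

-- ===== PORT B =====
-- walk the sorted list of stripped long lines, tracking the current run of equal strings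
def pvBScan : List String → String → Nat → Bool
  | [], _, _ => true
  | x :: xs, prev, run =>
    if x == prev then
      if run + 1 > 2 then false else pvBScan xs prev (run + 1)
    else pvBScan xs x 1

def is_report_valid_py_alt (report_text : String) : Bool :=
  if report_text == "" || PySem.Str.len report_text < 50 then false
  else if PySem.Str.count (PySem.Str.lower report_text) "disclaimer" > 2 then false
  else
    let lines := (PySem.Str.split? report_text "\n").getD []
    if lines.length > 5 then
      let longs := PySem.List.sorted ((lines.map PySem.Str.strip).filter (fun s => PySem.Str.len s > 20)) (fun x => x) false
      match longs with
      | [] => true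
      | x :: xs => pvBScan xs x 1
    else true

-- ===== PRECONDITION & SPEC =====
def Spec_is_report_valid_py (report_text : String) (out : Bool) : Prop := out = is_report_valid_py_alt report_text
instance (report_text : String) (out : Bool) : Decidable (Spec_is_report_valid_py report_text out) := by unfold Spec_is_report_valid_py; infer_instance

-- ===== CLAIM (what is proved, stated in full; the proofs are below) =====
def Claim_equal_is_report_valid_py : Prop := ∀ (report_text : String), Dom_is_report_valid_py report_text → Spec_is_report_valid_py report_text (is_report_valid_py report_text)

-- ===== LEMMAS AND PROOFS =====

-- the multiset of stripped long lines both loops inspect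
def pvLongs (lines : List String) : List String :=
  (lines.map PySem.Str.strip).filter (fun s => PySem.Str.len s > 20)

-- A's loop returns true iff no stripped long line reaches 3 occurrences (counts offset by c)
theorem pvALoop_spec (lines : List String) (d : PySem.Dict String Int) (c : String → Nat)
    (hd : ∀ a, d.getD a 0 = (c a : Int)) (hc : ∀ a, c a ≤ 2) :
    (pvALoop lines d = true ↔ ∀ a, c a + (pvLongs lines).count a ≤ 2) := by
  induction lines generalizing d c with
  | nil =>
    simp [pvALoop, pvLongs]
    intro a
    exact hc a
  | cons line rest ih =>
    by_cases hlen : PySem.Str.len (PySem.Str.strip line) > 20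
    · have hlongs : pvLongs (line :: rest) = PySem.Str.strip line :: pvLongs rest := by
        unfold pvLongs
        rw [List.map_cons, List.filter_cons, if_pos (decide_eq_true hlen)]
      set s := PySem.Str.strip line with hs
      have hget : (d.insert s (d.getD s 0 + 1)).getD s 0 = (c s : Int) + 1 := by
        rw [PySem.Dict.getD_insert, if_pos rfl, hd s]
      by_cases hbig : (c s : Int) + 1 > 2
      · have hA : pvALoop (line :: rest) d = false := by
          simp only [pvALoop, ← hs]
          rw [if_pos hlen, hget, if_pos hbig]
        rw [hA, hlongs]
        simp only [Bool.false_eq_true, false_iff, not_forall]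
        refine ⟨s, ?_⟩
        rw [List.count_cons_self]
        omega
      · have hstep : pvALoop (line :: rest) d = pvALoop rest (d.insert s (d.getD s 0 + 1)) := by
          simp only [pvALoop, ← hs]
          rw [if_pos hlen, hget, if_neg hbig]
        rw [hstep, hlongs]
        rw [ih (d.insert s (d.getD s 0 + 1)) (fun a => if a = s then c a + 1 else c a)
          (by
            intro a
            show (d.insert s (d.getD s 0 + 1)).getD a 0 = ((if a = s then c a + 1 else c a : Nat) : Int)
            rw [PySem.Dict.getD_insert]
            by_cases h : a = s
            · rw [if_pos h, if_pos h, h, hd s]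
              push_cast
              ring
            · rw [if_neg h, if_neg h, hd a])
          (by
            intro a
            show (if a = s then c a + 1 else c a) ≤ 2
            by_cases h : a = s
            · rw [if_pos h, h]
              omega
            · rw [if_neg h]
              exact hc a)]
        constructor
        · intro h a
          have := h a
          by_cases ha : a = s
          · rw [ha] at this ⊢
            rw [if_pos rfl] at this
            rw [List.count_cons_self]
            omega
          · rw [if_neg ha] at this
            rw [List.count_cons_of_ne (Ne.symm ha)]
            omega
        · intro h a
          have := h a
          by_cases ha : a = s
          · rw [ha] at this ⊢
            rw [List.count_cons_self] at this
            rw [if_pos rfl]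
            omega
          · rw [List.count_cons_of_ne (Ne.symm ha)] at this
            rw [if_neg ha]
            omega
    · have hlongs : pvLongs (line :: rest) = pvLongs rest := by
        unfold pvLongs
        rw [List.map_cons, List.filter_cons, if_neg (by simpa using hlen)]
      have hstep : pvALoop (line :: rest) d = pvALoop rest d := by
        simp only [pvALoop]
        rw [if_neg hlen]
      rw [hstep, hlongs]
      exact ih d c hd hc

-- B's scan on a sorted tail: true iff the current run stays ≤ 2 and every later string occurs ≤ 2 times
theorem pvBScan_spec (xs : List String) (prev : String) (run : Nat)
    (hrun : run ≤ 2) (hsorted : List.Pairwise (· ≤ ·) (prev :: xs)) :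
    (pvBScan xs prev run = true ↔ run + xs.count prev ≤ 2 ∧ ∀ a, a ≠ prev → xs.count a ≤ 2) := by
  induction xs generalizing prev run with
  | nil =>
    simp [pvBScan]
    omega
  | cons x xs ih =>
    rcases List.pairwise_cons.mp hsorted with ⟨hle, hsx⟩
    by_cases hx : x = prev
    · subst hx
      by_cases hbig : run + 1 > 2
      · have hf : pvBScan (x :: xs) x run = false := by
          simp [pvBScan, hbig]
        rw [hf]
        simp only [Bool.false_eq_true, false_iff, not_and_or, not_forall]
        left
        rw [List.count_cons_self]
        omega
      · have hstep : pvBScan (x :: xs) x run = pvBScan xs x (run + 1) := by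
          simp [pvBScan, hbig]
        rw [hstep, ih x (run + 1) (by omega) hsx]
        constructor
        · rintro ⟨h1, h2⟩
          refine ⟨by rw [List.count_cons_self]; omega, ?_⟩
          intro a ha
          have := h2 a ha
          rw [List.count_cons_of_ne (Ne.symm ha)]
          omega
        · rintro ⟨h1, h2⟩
          rw [List.count_cons_self] at h1
          refine ⟨by omega, ?_⟩
          intro a ha
          have := h2 a ha
          rw [List.count_cons_of_ne (Ne.symm ha)] at this
          omega
    · -- prev < x and everything later is ≥ x, so prev no longer occurs
      have hprevx : prev ≤ x := hle x (by simp)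
      have hnotin : prev ∉ x :: xs := by
        rcases List.pairwise_cons.mp hsx with ⟨hxle, _⟩
        intro hmem
        rcases List.mem_cons.mp hmem with h | h
        · exact hx h.symm
        · have h1 : x ≤ prev := hxle prev h
          exact hx (le_antisymm h1 hprevx)
      have hcnt0 : (x :: xs).count prev = 0 := List.count_eq_zero.mpr hnotin
      have hstep : pvBScan (x :: xs) prev run = pvBScan xs x 1 := by
        simp [pvBScan, hx]
      rw [hstep, ih x 1 (by omega) hsx]
      constructor
      · rintro ⟨h1, h2⟩
        refine ⟨by rw [hcnt0]; omega, ?_⟩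
        intro a ha
        by_cases hax : a = x
        · rw [hax, List.count_cons_self]
          omega
        · have := h2 a hax
          rw [List.count_cons_of_ne (Ne.symm hax)]
          omega
      · rintro ⟨h1, h2⟩
        have hxcnt := h2 x hx
        rw [List.count_cons_self] at hxcnt
        refine ⟨by omega, ?_⟩
        intro a hax
        by_cases hap : a = prev
        · rw [hap, List.count_eq_zero.mpr (fun h => hnotin (List.mem_cons_of_mem _ h))]
          omega
        · have := h2 a hap
          rw [List.count_cons_of_ne (Ne.symm hax)] at this
          omega

-- both repetition checks decide the same predicate: every long line occurs ≤ 2 times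
theorem pvLoops_eq (lines : List String) :
    pvALoop lines PySem.Dict.empty =
      (match PySem.List.sorted (pvLongs lines) (fun x => x) false with
       | [] => true
       | x :: xs => pvBScan xs x 1) := by
  have hA := pvALoop_spec lines PySem.Dict.empty (fun _ => 0)
    (by intro a; simp [PySem.Dict.getD, PySem.Dict.get?, PySem.Dict.empty])
    (by intro a; norm_num)
  simp only [Nat.zero_add] at hA
  have hperm := PySem.List.sorted_perm (pvLongs lines) (fun x => x) false
  cases hsort : PySem.List.sorted (pvLongs lines) (fun x => x) false with
  | nil =>
    have hnil : pvLongs lines = [] := (hsort ▸ hperm).symm.eq_nil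
    simp only []
    rw [hA.mpr (by intro a; simp [hnil])]
  | cons x xs =>
    have hpair : List.Pairwise (· ≤ ·) (x :: xs) := by
      have := PySem.List.sorted_pairwise (pvLongs lines) (fun x => x)
      rw [hsort] at this
      exact this
    have hcnt : ∀ a, (pvLongs lines).count a = (x :: xs).count a := by
      intro a
      rw [hsort] at hperm
      exact (hperm.count_eq a).symm
    have hB := pvBScan_spec xs x 1 (by omega) hpair
    simp only []
    by_cases hall : ∀ a, (pvLongs lines).count a ≤ 2
    · rw [hA.mpr hall, (hB.mpr ?_).symm]
      constructor
      · have := hall x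
        rw [hcnt x, List.count_cons_self] at this
        omega
      · intro a ha
        have := hall a
        rw [hcnt a, List.count_cons_of_ne (Ne.symm ha)] at this
        omega
    · simp only [not_forall, not_le] at hall
      rcases hall with ⟨a, ha⟩
      have hAf : pvALoop lines PySem.Dict.empty = false := by
        cases h : pvALoop lines PySem.Dict.empty
        · rfl
        · exact absurd (hA.mp h a) (by omega)
      have hBf : pvBScan xs x 1 = false := by
        cases h : pvBScan xs x 1
        · rfl
        · exfalso
          rcases hB.mp h with ⟨h1, h2⟩
          rw [hcnt a] at ha
          by_cases hax : a = x
          · rw [hax, List.count_cons_self] at ha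
            omega
          · have := h2 a hax
            rw [List.count_cons_of_ne (Ne.symm hax)] at ha
            omega
      rw [hAf, hBf]

-- ===== VERDICT (by name: the statement is the Claim_ definition above) =====
theorem is_report_valid_py_spec : Claim_equal_is_report_valid_py := by
  intro report_text _
  unfold Spec_is_report_valid_py is_report_valid_py is_report_valid_py_alt
  have h := pvLoops_eq ((PySem.Str.split? report_text "\n").getD [])
  unfold pvLongs at h
  simp only [h]
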